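-- pv_equiv track=rewrite | github.com/jiacheng-xu/vmf_vae_nlp | archive/genut/util/helper.py | single_n_gram
-- ===== SOURCE A (Python) =====
-- stop_words = [',', '.', 'to', 'the', '<\\s>', '<s>']
--
-- def single_n_gram(ns, seq):
--     ngrams = [[] for _ in range(len(ns))]
--     l = len(seq)
--     for idx in range(l):
--         for i, n in enumerate(ns):
--             if idx - n + 1 >= 0:
--                 tmp = ''
--                 add = True
--                 for x in range(idx - n + 1, idx + 1, 1):
--                     if str(seq[x]) in stop_words:
--                         add = False
--                         break
--                     tmp += str(seq[x]) + '_'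
--                 if add:
--                     ngrams[i].append(tmp)
--     return ngrams
-- ===== SOURCE B (Python) =====
-- stop_words = [',', '.', 'to', 'the', '<\\s>', '<s>']
--
-- def single_n_gram(ns, seq):
--     # One pass over seq maintaining the streak of consecutive non-stop-word
--     # tokens ending at the current position; a window of length n is valid
--     # exactly when the streak holds at least n tokens, and its string is the
--     # join of the streak's last n tokens.
--     ngrams = [[] for _ in ns]
--     streak = []
--     for tok in seq:
--         tok = str(tok)
--         if tok in stop_words:
--             streak = []
--         else:
--             streak.append(tok)
--         for i, n in enumerate(ns):
--             if n <= len(streak):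
--                 ngrams[i].append(''.join(t + '_' for t in streak[len(streak) - n:]))
--     return ngrams
-- ===== Notes on version B (the rewrite author's own statement) =====
-- stated objective: alternative
-- what changed: Instead of rescanning every candidate window for stop words (with a break) for each (idx, n), B makes one pass over seq maintaining the streak of consecutive non-stop tokens ending at the current position: a window of length n is valid iff the streak holds at least n tokens, and its string is the join of the streak's last n tokens, so the inner validity scan disappears.
import Mathlib
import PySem

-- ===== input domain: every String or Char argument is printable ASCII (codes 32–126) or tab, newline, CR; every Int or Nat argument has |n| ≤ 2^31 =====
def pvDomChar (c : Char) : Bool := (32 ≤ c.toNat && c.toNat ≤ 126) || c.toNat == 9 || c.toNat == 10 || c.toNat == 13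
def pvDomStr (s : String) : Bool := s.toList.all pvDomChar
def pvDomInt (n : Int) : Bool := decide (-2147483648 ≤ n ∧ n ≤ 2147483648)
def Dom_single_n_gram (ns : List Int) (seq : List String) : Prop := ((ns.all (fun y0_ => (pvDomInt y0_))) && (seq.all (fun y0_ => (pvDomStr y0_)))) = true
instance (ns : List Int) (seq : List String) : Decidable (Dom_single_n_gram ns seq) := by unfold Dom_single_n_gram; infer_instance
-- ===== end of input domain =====

-- B replaces A's per-window stop-word rescan by a single pass that maintains the
-- streak of consecutive non-stop tokens ending at the current position (alternative
-- decomposition; same asymptotic cost, the inner break-scan disappears).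

def pvStop : List String := [",", ".", "to", "the", "<\\s>", "<s>"]

-- ===== PORT A =====
-- inner 'for x in range(idx-n+1, idx+1)' with its break, building tmp and add
def pvScan (seq : List String) : List Int → String → String × Bool
  | [], tmp => (tmp, true)
  | x :: xs, tmp =>
    let s := PySem.List.pyGetD seq x ""
    if pvStop.contains s then (tmp, false)
    else pvScan seq xs (tmp ++ (s ++ "_"))

def single_n_gram (ns : List Int) (seq : List String) : List (List String) :=
  (PySem.List.pyRange 0 (PySem.List.len seq) 1).foldl
    (fun g idx =>
      (PySem.List.enumerate ns 0).foldl
        (fun g p =>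
          if idx - p.2 + 1 ≥ 0 then
            let r := pvScan seq (PySem.List.pyRange (idx - p.2 + 1) (idx + 1) 1) ""
            if r.2 then PySem.List.pySetD g p.1 (PySem.List.pyGetD g p.1 [] ++ [r.1]) else g
          else g) g)
    (ns.map (fun _ => []))

-- ===== PORT B =====
-- ''.join(t + '_' for t in ws)
def pvJoinU (ws : List String) : String := ws.foldl (fun acc t => acc ++ (t ++ "_")) ""

def single_n_gram_alt (ns : List Int) (seq : List String) : List (List String) :=
  (seq.foldl
    (fun (st : List (List String) × List String) tok =>
      let streak := if pvStop.contains tok then [] else st.2 ++ [tok]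
      ((PySem.List.enumerate ns 0).foldl
        (fun g p =>
          if p.2 ≤ PySem.List.len streak then
            PySem.List.pySetD g p.1 (PySem.List.pyGetD g p.1 [] ++
              [pvJoinU (PySem.List.slice streak (some (PySem.List.len streak - p.2)) none)])
          else g) st.1, streak))
    (ns.map (fun _ => []), [])).1

-- ===== PRECONDITION & SPEC =====
def Spec_single_n_gram (ns : List Int) (seq : List String) (out : List (List String)) : Prop := out = single_n_gram_alt ns seq
instance (ns : List Int) (seq : List String) (out : List (List String)) : Decidable (Spec_single_n_gram ns seq out) := by unfold Spec_single_n_gram; infer_instance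

-- ===== CLAIM (what is proved, stated in full; the proofs are below) =====
def Claim_equal_single_n_gram : Prop := ∀ (ns : List Int) (seq : List String), Dom_single_n_gram ns seq → Spec_single_n_gram ns seq (single_n_gram ns seq)

-- ===== LEMMAS AND PROOFS =====
def pvScanTok : List String → String → String × Bool
  | [], tmp => (tmp, true)
  | t :: ts, tmp => if pvStop.contains t then (tmp, false) else pvScanTok ts (tmp ++ (t ++ "_"))

lemma pvScanTok_snd (ws : List String) : ∀ acc,
    (pvScanTok ws acc).2 = ws.all (fun t => !pvStop.contains t) := by
  induction ws with
  | nil => intro acc; simp [pvScanTok]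
  | cons t ts ih =>
    intro acc
    by_cases h : t ∈ pvStop
    · simp [pvScanTok, h]
    · simp [pvScanTok, h, ih]

lemma pvScanTok_ok (ws : List String) : ∀ acc, ws.all (fun t => !pvStop.contains t) = true →
    pvScanTok ws acc = (ws.foldl (fun a t => a ++ (t ++ "_")) acc, true) := by
  induction ws with
  | nil => intro acc _; simp [pvScanTok]
  | cons t ts ih =>
    intro acc h
    simp only [List.all_cons, Bool.and_eq_true, Bool.not_eq_true', List.contains_eq_mem,
      decide_eq_false_iff_not] at h
    have h2 : (ts.all fun t => !pvStop.contains t) = true := by simpa using h.2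
    simp [pvScanTok, h.1, ih _ h2]

def pvRun (q : List String) : List String :=
  q.foldl (fun acc t => if pvStop.contains t then [] else acc ++ [t]) []
lemma pvRun_concat (q : List String) (t : String) :
    pvRun (q ++ [t]) = if pvStop.contains t then [] else pvRun q ++ [t] := by
  simp [pvRun, List.foldl_append]

lemma pvRun_spec (q : List String) :
    (pvRun q).length ≤ q.length ∧
    pvRun q = q.drop (q.length - (pvRun q).length) ∧
    (pvRun q).all (fun t => !pvStop.contains t) = true ∧
    ((pvRun q).length < q.length →
      pvStop.contains (q.getD (q.length - (pvRun q).length - 1) "") = true) := by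
  induction q using List.reverseRecOn with
  | nil => simp [pvRun]
  | append_singleton q t ih =>
    obtain ⟨h1, h2, h3, h4⟩ := ih
    by_cases hs : t ∈ pvStop
    · have hrc0 : pvRun (q ++ [t]) = [] := by simp [pvRun_concat, hs]
      refine ⟨by simp [hrc0], by simp [hrc0], by simp [hrc0], ?_⟩
      intro h
      simp only [hrc0, List.length_nil, Nat.sub_zero, List.length_append, List.length_cons]
      have harith : q.length + 1 - 1 = q.length := by omega
      rw [harith, List.getD_eq_getElem _ _ (by simp), List.getElem_append_right (by omega)]
      simp [hs]
    · have hrc : pvRun (q ++ [t]) = pvRun q ++ [t] := by simp [pvRun_concat, hs]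
      have h3' : ∀ x ∈ pvRun q, x ∉ pvStop := by simpa using h3
      refine ⟨by simp [hrc]; omega, ?_, by simp [hrc, hs]; exact h3', ?_⟩
      · rw [hrc]
        simp only [List.length_append, List.length_cons, List.length_nil]
        have harith : q.length + 1 - ((pvRun q).length + 1) = q.length - (pvRun q).length := by omega
        rw [harith, List.drop_append_of_le_length (by omega)]
        rw [← h2]
      · intro h
        rw [hrc] at h ⊢
        simp only [List.length_append, List.length_cons, List.length_nil] at h ⊢
        have hlt : (pvRun q).length < q.length := by omega
        have harith : q.length + 1 - ((pvRun q).length + 1) - 1 = q.length - (pvRun q).length - 1 := by omega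
        rw [harith, List.getD_eq_getElem _ _ (by simp; omega), List.getElem_append_left (by omega),
          ← List.getD_eq_getElem _ "" (by omega)]
        exact h4 hlt


lemma pvScan_eq_tok (seq : List String) (b : Int) (hb : b ≤ (seq.length : Int)) :
    ∀ (m : Nat) (a : Int), (b - a).toNat = m → 0 ≤ a → ∀ acc,
      pvScan seq (PySem.List.pyRange a b 1) acc
        = pvScanTok ((seq.take b.toNat).drop a.toNat) acc := by
  intro m
  induction m with
  | zero =>
    intro a hm ha acc
    have hba : b ≤ a := by omega
    rw [PySem.List.pyRange_one_eq_nil hba]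
    have : (seq.take b.toNat).length ≤ a.toNat := by
      simp [List.length_take]; omega
    rw [List.drop_eq_nil_of_le this]
    rfl
  | succ m ih =>
    intro a hm ha acc
    have hab : a < b := by omega
    rw [PySem.List.pyRange_one_cons hab]
    have hb0 : 0 ≤ b := by omega
    have hlt : a.toNat < (seq.take b.toNat).length := by
      simp [List.length_take]; omega
    rw [List.drop_eq_getElem_cons hlt]
    have hget : (seq.take b.toNat)[a.toNat] = seq[a.toNat]'(by simp at hlt; omega) :=
      List.getElem_take
    have hgetD : PySem.List.pyGetD seq a "" = seq[a.toNat]'(by simp at hlt; omega) :=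
      PySem.List.pyGetD_eq_getElem seq "" ha (by simp at hlt; omega)
    show (if pvStop.contains (PySem.List.pyGetD seq a "") then (acc, false)
          else pvScan seq (PySem.List.pyRange (a+1) b 1) (acc ++ (PySem.List.pyGetD seq a "" ++ "_")))
        = pvScanTok ((seq.take b.toNat)[a.toNat] :: (seq.take b.toNat).drop (a.toNat + 1)) acc
    rw [hgetD, hget]
    simp only [pvScanTok]
    by_cases hc : pvStop.contains (seq[a.toNat]'(by simp at hlt; omega))
    · simp only [hc, if_true]
    · simp only [hc, Bool.false_eq_true, if_false]
      have := ih (a+1) (by omega) (by omega) (acc ++ (seq[a.toNat]'(by simp at hlt; omega) ++ "_"))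
      have hnat : (a + 1).toNat = a.toNat + 1 := by omega
      rw [this, hnat]

lemma pvWindow_spec (q : List String) (n : Nat) (h1 : 1 ≤ n) (h2 : n ≤ q.length) :
    ((q.drop (q.length - n)).all (fun t => !pvStop.contains t) = true
        ↔ n ≤ (pvRun q).length)
    ∧ (n ≤ (pvRun q).length →
        q.drop (q.length - n) = (pvRun q).drop ((pvRun q).length - n)) := by
  obtain ⟨hL, hsuf, hall, hbd⟩ := pvRun_spec q
  have hdir : n ≤ (pvRun q).length →
      q.drop (q.length - n) = (pvRun q).drop ((pvRun q).length - n) := by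
    intro hn
    set L := (pvRun q).length with hLd
    conv_rhs => rw [hsuf]
    rw [List.drop_drop]
    congr 1
    omega
  refine ⟨⟨?_, ?_⟩, hdir⟩
  · intro hwall
    by_contra hn
    have hLlt : (pvRun q).length < q.length := by omega
    have hstop := hbd hLlt
    have hidx : q.length - (pvRun q).length - 1 < q.length := by omega
    have hmem : q.getD (q.length - (pvRun q).length - 1) "" ∈ q.drop (q.length - n) := by
      rw [List.getD_eq_getElem _ _ hidx, List.mem_iff_getElem]
      refine ⟨q.length - (pvRun q).length - 1 - (q.length - n), by simp [List.length_drop]; omega, ?_⟩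
      rw [List.getElem_drop]
      congr 1
      omega
    rw [List.all_eq_true] at hwall
    have hx := hwall _ hmem
    simp only [Bool.not_eq_true', List.contains_eq_mem, decide_eq_false_iff_not] at hx
    rw [List.contains_eq_mem, decide_eq_true_iff] at hstop
    exact hx hstop
  · intro hn
    rw [hdir hn]
    rw [List.all_eq_true] at hall ⊢
    intro x hx
    exact hall x (List.mem_of_mem_drop hx)


lemma pvStep_eq (seq : List String) (k : Nat) (hk : k < seq.length)
    (g : List (List String)) (p : Int × Int) :
    (if (k : Int) - p.2 + 1 ≥ 0 then
        (if (pvScan seq (PySem.List.pyRange ((k : Int) - p.2 + 1) ((k : Int) + 1) 1) "").2 then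
          PySem.List.pySetD g p.1 (PySem.List.pyGetD g p.1 [] ++
            [(pvScan seq (PySem.List.pyRange ((k : Int) - p.2 + 1) ((k : Int) + 1) 1) "").1])
        else g)
      else g)
    = (if p.2 ≤ PySem.List.len (pvRun (seq.take (k + 1))) then
        PySem.List.pySetD g p.1 (PySem.List.pyGetD g p.1 [] ++
          [pvJoinU (PySem.List.slice (pvRun (seq.take (k + 1)))
            (some (PySem.List.len (pvRun (seq.take (k + 1))) - p.2)) none)])
      else g) := by
  obtain ⟨i, n⟩ := p
  simp only at *
  have hqlen : (seq.take (k + 1)).length = k + 1 := by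
    simp [List.length_take]; omega
  obtain ⟨hL, hsuf, hall, hbd⟩ := pvRun_spec (seq.take (k + 1))
  rw [hqlen] at hL
  simp only [PySem.List.len_eq]
  by_cases hn0 : n ≤ 0
  · -- empty window: both sides append ""
    have hg : (k : Int) - n + 1 ≥ 0 := by omega
    rw [if_pos hg, PySem.List.pyRange_one_eq_nil (by omega)]
    have hc : n ≤ ((pvRun (seq.take (k + 1))).length : Int) := by
      have : (0:Int) ≤ ((pvRun (seq.take (k + 1))).length : Int) := by positivity
      omega
    rw [if_pos hc]
    have hsl := PySem.List.slice_from (pvRun (seq.take (k + 1)))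
      (a := ((pvRun (seq.take (k + 1))).length : Int) - n) (by omega)
    rw [hsl]
    have hdrop : (pvRun (seq.take (k + 1))).drop
        (((pvRun (seq.take (k + 1))).length : Int) - n).toNat = [] := by
      apply List.drop_eq_nil_of_le; omega
    rw [hdrop]
    rfl
  · have hn1 : 1 ≤ n := by omega
    by_cases hbig : (k : Int) - n + 1 ≥ 0
    · -- window fits in the prefix
      have hn2 : n ≤ (k : Int) + 1 := by omega
      have hnn1 : 1 ≤ n.toNat := by omega
      have hnn2 : n.toNat ≤ k + 1 := by omega
      have hscan := pvScan_eq_tok seq ((k : Int) + 1) (by exact_mod_cast hk)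
        (((k : Int) + 1 - ((k : Int) - n + 1)).toNat) ((k : Int) - n + 1) rfl (by omega) ""
      have hcast1 : ((k : Int) + 1).toNat = k + 1 := by omega
      have hcast2 : ((k : Int) - n + 1).toNat = k + 1 - n.toNat := by omega
      rw [hcast1, hcast2] at hscan
      have hwin := pvWindow_spec (seq.take (k + 1)) n.toNat hnn1 (by omega)
      rw [hqlen] at hwin
      rw [if_pos hbig, hscan]
      by_cases hok : ((seq.take (k + 1)).drop (k + 1 - n.toNat)).all
          (fun t => !pvStop.contains t) = true
      · have hnL : n.toNat ≤ (pvRun (seq.take (k + 1))).length := hwin.1.mp hok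
        have hsufeq := hwin.2 hnL
        rw [pvScanTok_ok _ _ hok]
        simp only [if_pos (show n ≤ ((pvRun (seq.take (k + 1))).length : Int) by omega)]
        have hsl := PySem.List.slice_from (pvRun (seq.take (k + 1)))
          (a := ((pvRun (seq.take (k + 1))).length : Int) - n) (by omega)
        rw [hsl]
        have hcast3 : (((pvRun (seq.take (k + 1))).length : Int) - n).toNat
            = (pvRun (seq.take (k + 1))).length - n.toNat := by omega
        rw [hcast3, ← hsufeq]
        rfl
      · have hnL : ¬ n.toNat ≤ (pvRun (seq.take (k + 1))).length := fun h => hok (hwin.1.mpr h)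
        rw [pvScanTok_snd]
        simp only [hok, Bool.false_eq_true, if_false]
        rw [if_neg (by omega)]
    · -- window falls off the left edge: both sides skip
      rw [if_neg hbig, if_neg (by omega)]

lemma pvOuter (ns : List Int) (seq : List String) :
    ∀ (m k : Nat), seq.length - k = m → k ≤ seq.length → ∀ (g : List (List String)),
      (PySem.List.pyRange (k : Int) (PySem.List.len seq) 1).foldl
        (fun g idx =>
          (PySem.List.enumerate ns 0).foldl
            (fun g p =>
              if idx - p.2 + 1 ≥ 0 then
                let r := pvScan seq (PySem.List.pyRange (idx - p.2 + 1) (idx + 1) 1) ""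
                if r.2 then PySem.List.pySetD g p.1 (PySem.List.pyGetD g p.1 [] ++ [r.1]) else g
              else g) g) g
      = ((seq.drop k).foldl
          (fun (st : List (List String) × List String) tok =>
            let streak := if pvStop.contains tok then [] else st.2 ++ [tok]
            ((PySem.List.enumerate ns 0).foldl
              (fun g p =>
                if p.2 ≤ PySem.List.len streak then
                  PySem.List.pySetD g p.1 (PySem.List.pyGetD g p.1 [] ++
                    [pvJoinU (PySem.List.slice streak (some (PySem.List.len streak - p.2)) none)])
                else g) st.1, streak))
          (g, pvRun (seq.take k))).1 := by
  intro m
  induction m with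
  | zero =>
    intro k hm hk g
    have hkl : k = seq.length := by omega
    subst hkl
    rw [PySem.List.pyRange_one_eq_nil (by simp), List.drop_length]
    rfl
  | succ m ih =>
    intro k hm hk g
    have hklt : k < seq.length := by omega
    rw [show PySem.List.len seq = (seq.length : Int) from by simp,
      PySem.List.pyRange_one_cons (by exact_mod_cast hklt),
      List.drop_eq_getElem_cons hklt]
    simp only [List.foldl_cons]
    have htake : seq.take (k + 1) = seq.take k ++ [seq[k]'hklt] := by
      rw [List.take_add_one]
      simp [List.getElem?_eq_getElem hklt]
    have hstreak : (if pvStop.contains (seq[k]'hklt) then [] else pvRun (seq.take k) ++ [seq[k]'hklt])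
        = pvRun (seq.take (k + 1)) := by
      rw [htake, pvRun_concat]
    have hfun : (fun (g : List (List String)) (p : Int × Int) =>
          if (k : Int) - p.2 + 1 ≥ 0 then
            let r := pvScan seq (PySem.List.pyRange ((k : Int) - p.2 + 1) ((k : Int) + 1) 1) ""
            if r.2 then PySem.List.pySetD g p.1 (PySem.List.pyGetD g p.1 [] ++ [r.1]) else g
          else g)
        = (fun (g : List (List String)) (p : Int × Int) =>
          if p.2 ≤ PySem.List.len (pvRun (seq.take (k + 1))) then
            PySem.List.pySetD g p.1 (PySem.List.pyGetD g p.1 [] ++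
              [pvJoinU (PySem.List.slice (pvRun (seq.take (k + 1)))
                (some (PySem.List.len (pvRun (seq.take (k + 1))) - p.2)) none)])
          else g) :=
      funext fun g => funext fun p => pvStep_eq seq k hklt g p
    show (PySem.List.pyRange ((k : Int) + 1) (seq.length : Int) 1).foldl _
        ((PySem.List.enumerate ns 0).foldl
          (fun g p =>
            if (k : Int) - p.2 + 1 ≥ 0 then
              let r := pvScan seq (PySem.List.pyRange ((k : Int) - p.2 + 1) ((k : Int) + 1) 1) ""
              if r.2 then PySem.List.pySetD g p.1 (PySem.List.pyGetD g p.1 [] ++ [r.1]) else g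
            else g) g) = _
    rw [hfun]
    have hcast : ((k : Int) + 1) = ((k + 1 : Nat) : Int) := by push_cast; ring
    rw [hcast, show ((seq.length : Int)) = PySem.List.len seq from by simp]
    rw [ih (k + 1) (by omega) (by omega)]
    simp only [hstreak]

-- ===== VERDICT (by name: the statement is the Claim_ definition above) =====
theorem single_n_gram_spec : Claim_equal_single_n_gram := by
  intro ns seq _
  show single_n_gram ns seq = single_n_gram_alt ns seq
  unfold single_n_gram single_n_gram_alt
  have h := pvOuter ns seq seq.length 0 (by omega) (by omega) (ns.map (fun _ => []))
  simpa using h
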